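-- pv_equiv track=rewrite | github.com/kowi-kowi/RPA_projects | EDI/SE_EDI.py | getScancloud
-- ===== SOURCE A (Python) =====
-- def getScancloud(text):
--     keyword = 'Seller party:'
--     customerName = ''
--
--     table = text.split('\n')
--     lista = list()
--
--     for element in table:
--         if keyword in element:
--             lista.append(element)
--
--     if lista:
--         customerName = lista[0][len(keyword):].strip()
--         t = customerName.split(',')
--         customerName = t[0].strip()
--
--     if customerName:
--         return customerName
--     else:
--         return '****************'
-- ===== SOURCE B (Python) =====
-- def getScancloud(text):
--     keyword = 'Seller party:'
--     i = text.find(keyword)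
--     if i == -1:
--         return '****************'
--     start = text.rfind('\n', 0, i) + 1
--     end = text.find('\n', i)
--     line = text[start:] if end == -1 else text[start:end]
--     name = line[len(keyword):].strip().split(',')[0].strip()
--     return name if name else '****************'
-- ===== Notes on version B (the rewrite author's own statement) =====
-- stated objective: alternative
-- what changed: B never splits the text into lines and never scans lines: it locates the keyword with one whole-text substring search (str.find), then recovers the enclosing line's boundaries with rfind/find of the newline and slices the name out of the original text.
import Mathlib
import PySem

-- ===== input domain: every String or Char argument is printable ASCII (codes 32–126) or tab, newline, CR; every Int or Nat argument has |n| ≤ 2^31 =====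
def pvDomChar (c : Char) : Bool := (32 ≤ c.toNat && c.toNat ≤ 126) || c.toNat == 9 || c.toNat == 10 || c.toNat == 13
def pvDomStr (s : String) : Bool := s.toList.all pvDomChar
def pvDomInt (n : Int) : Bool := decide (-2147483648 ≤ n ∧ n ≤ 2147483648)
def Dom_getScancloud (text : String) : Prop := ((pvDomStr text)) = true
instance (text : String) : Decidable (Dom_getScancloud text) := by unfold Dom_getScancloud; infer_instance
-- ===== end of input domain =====

-- B locates the keyword with one whole-text substring search and newline-boundary
-- searches instead of splitting into lines and scanning them; objective: alternative algorithm.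

-- ===== PORT A =====
def getScancloud (text : String) : String :=
  let keyword := "Seller party:"
  let table := (PySem.Str.split? text "\n").getD []
  let lista := table.foldl (fun acc e => if PySem.Str.isIn keyword e then acc ++ [e] else acc) ([] : List String)
  let customerName :=
    match lista with
    | [] => ""
    | first :: _ =>
      -- customerName = lista[0][len(keyword):].strip(); t = customerName.split(','); t[0].strip()
      let cn := PySem.Str.strip (PySem.Str.slice first (some (PySem.Str.len keyword)) none)
      let t := (PySem.Str.split? cn ",").getD []   -- split with nonempty sep: never empty
      match t with
      | [] => ""
      | t0 :: _ => PySem.Str.strip t0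
  if customerName ≠ "" then customerName else "****************"

-- ===== PORT B =====
def getScancloud_alt (text : String) : String :=
  let keyword := "Seller party:"
  let i := PySem.Str.find text keyword
  if i = -1 then "****************"
  else
    let start := PySem.Str.rfindFrom text "\n" 0 (some i) + 1
    let e := PySem.Str.findFrom text "\n" i none
    let line := if e = -1 then PySem.Str.slice text (some start) none
                else PySem.Str.slice text (some start) (some e)
    -- name = line[len(keyword):].strip().split(',')[0].strip()
    let name :=
      match (PySem.Str.split? (PySem.Str.strip (PySem.Str.slice line (some (PySem.Str.len keyword)) none)) ",").getD [] with
      | [] => ""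
      | t0 :: _ => PySem.Str.strip t0
    if name ≠ "" then name else "****************"

-- ===== PRECONDITION & SPEC =====
def Spec_getScancloud (text : String) (out : String) : Prop := out = getScancloud_alt text
instance (text : String) (out : String) : Decidable (Spec_getScancloud text out) := by unfold Spec_getScancloud; infer_instance

-- ===== CLAIM (what is proved, stated in full; the proofs are below) =====
def Claim_equal_getScancloud : Prop := ∀ (text : String), Dom_getScancloud text → Spec_getScancloud text (getScancloud text)

-- ===== LEMMAS AND PROOFS =====
def pvSplitC (c : Char) : List Char → List (List Char)
  | [] => [[]]
  | d :: rest => if d = c then [] :: pvSplitC c rest else (pvSplitC c rest).modifyHead (d :: ·)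

def pvJoinC (c : Char) : List (List Char) → List Char
  | [] => []
  | [a] => a
  | a :: b :: L => a ++ c :: pvJoinC c (b :: L)

theorem pvSplitC_exists_cons (c : Char) (s : List Char) : ∃ a T, pvSplitC c s = a :: T := by
  cases s with
  | nil => exact ⟨[], [], rfl⟩
  | cons d rest =>
    obtain ⟨a, T, h⟩ := pvSplitC_exists_cons c rest
    by_cases hd : d = c
    · exact ⟨[], pvSplitC c rest, by simp [pvSplitC, hd]⟩
    · exact ⟨d :: a, T, by simp [pvSplitC, hd, h]⟩

theorem pvGo (c : Char) (l : List Char) : ∀ (fuel : Nat) (cur : List Char) (acc : List (List Char)),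
    l.length ≤ fuel →
    PySem.Chars.splitOn.go [c] fuel l cur acc
      = acc.reverse ++ (pvSplitC c l).modifyHead (cur.reverse ++ ·) := by
  induction l with
  | nil =>
    intro fuel cur acc _
    cases fuel <;> rw [PySem.Chars.splitOn.go] <;> simp [pvSplitC]
  | cons d rest ih =>
    intro fuel cur acc hf
    cases fuel with
    | zero => simp at hf
    | succ n =>
      obtain ⟨a, T, hsp⟩ := pvSplitC_exists_cons c rest
      rw [PySem.Chars.splitOn.go]
      by_cases hd : d = c
      · subst hd
        have hpre : [d].isPrefixOf (d :: rest) = true := by simp [List.isPrefixOf]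
        simp only [hpre, if_pos, List.length_cons, List.length_nil, List.drop_succ_cons, List.drop_zero]
        rw [ih n [] (cur.reverse :: acc) (by simp at hf; omega)]
        simp [pvSplitC, hsp]
      · have hpre : [c].isPrefixOf (d :: rest) = false := by
          simp [List.isPrefixOf]; exact fun h => absurd h.symm hd
        simp only [hpre, Bool.false_eq_true, if_neg, not_false_iff]
        rw [ih n (d :: cur) acc (by simpa using Nat.succ_le_succ_iff.mp hf)]
        simp [pvSplitC, hd, hsp]

theorem pvSplitOn_eq (c : Char) (s : List Char) : PySem.Chars.splitOn s [c] = pvSplitC c s := by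
  have h := pvGo c s (s.length + 1) [] [] (by omega)
  obtain ⟨a, T, hsp⟩ := pvSplitC_exists_cons c s
  simpa [PySem.Chars.splitOn, hsp] using h

theorem pvJoin_split (c : Char) (s : List Char) : pvJoinC c (pvSplitC c s) = s := by
  induction s with
  | nil => rfl
  | cons d rest ih =>
    obtain ⟨a, T, hsp⟩ := pvSplitC_exists_cons c rest
    by_cases hd : d = c
    · subst hd
      have ih' := ih
      rw [hsp] at ih'
      simp [pvSplitC, hsp, pvJoinC, ih']
    · simp only [pvSplitC, if_neg hd, hsp, List.modifyHead]
      cases T with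
      | nil =>
        simp only [pvJoinC]
        have := ih; rw [hsp] at this; simpa [pvJoinC] using this
      | cons b T' =>
        simp only [pvJoinC, List.cons_append]
        have := ih; rw [hsp] at this; simp [pvJoinC] at this
        simp [this]

theorem pvSplitC_no_sep (c : Char) (s : List Char) : ∀ ln ∈ pvSplitC c s, c ∉ ln := by
  induction s with
  | nil => simp [pvSplitC]
  | cons d rest ih =>
    obtain ⟨a, T, hsp⟩ := pvSplitC_exists_cons c rest
    by_cases hd : d = c
    · simpa [pvSplitC, hd] using ih
    · rw [hsp] at ih
      intro ln hln
      rw [pvSplitC, if_neg hd, hsp] at hln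
      simp only [List.modifyHead, List.mem_cons] at hln
      rcases hln with h | h
      · subst h
        intro hmem
        rcases List.mem_cons.mp hmem with h | h
        · exact hd h.symm  -- careful direction
        · exact ih a (by simp) h
      · exact ih ln (by simp [h]) 


theorem pvInfix_of_prefix_drop (kw s : List Char) (j : Nat) (h : kw <+: s.drop j) : kw <:+: s := by
  obtain ⟨r, hr⟩ := h
  exact ⟨s.take j, r, by rw [List.append_assoc, hr, List.take_append_drop]⟩

theorem pvIsIn_iff_exists (kw s : List Char) :
    PySem.Chars.isIn kw s = true ↔ ∃ j, kw <+: s.drop j :=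
  ⟨fun h => (PySem.Chars.exists_prefix_drop_iff_isIn kw s).mpr h,
   fun h => (PySem.Chars.exists_prefix_drop_iff_isIn kw s).mp h⟩

theorem pvPrefixSplit (kw x y : List Char) (hc : '\n' ∉ kw) (h : kw <+: x ++ '\n' :: y) :
    kw.length ≤ x.length := by
  by_contra hlen
  push_neg at hlen
  have hi : x.length < kw.length := hlen
  have hget := List.IsPrefix.getElem h hi
  have hx : (x ++ '\n' :: y)[x.length]'(by simp) = '\n' := by
    rw [List.getElem_append_right (by omega)]
    simp
  exact hc ((hget.trans hx) ▸ List.getElem_mem hi)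

theorem pvInfixSplit (kw x y : List Char) (hc : '\n' ∉ kw) :
    (kw <:+: (x ++ '\n' :: y)) ↔ (kw <:+: x ∨ kw <:+: y) := by
  constructor
  · intro h
    obtain ⟨t, ht⟩ := (pvIsIn_iff_exists kw _).mp ((PySem.Chars.isIn_iff_infix kw _).mpr h)
    by_cases htx : t ≤ x.length
    · rw [List.drop_append_of_le_length htx] at ht
      have hlen := pvPrefixSplit kw (x.drop t) y hc ht
      left
      refine pvInfix_of_prefix_drop kw x t ?_
      have := List.prefix_iff_eq_take.mp ht
      rw [List.take_append_of_le_length (by simpa using hlen)] at this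
      exact List.prefix_iff_eq_take.mpr this
    · right
      push_neg at htx
      have : (x ++ '\n' :: y).drop t = y.drop (t - x.length - 1) := by
        have h1 : x ++ '\n' :: y = (x ++ ['\n']) ++ y := by simp
        rw [h1]
        conv_lhs => rw [show t = (x ++ ['\n']).length + (t - x.length - 1) by simp only [List.length_append, List.length_cons, List.length_nil]; omega]
        rw [List.drop_length_add_append]
      rw [this] at ht
      exact pvInfix_of_prefix_drop kw y _ ht
  · rintro (h | h)
    · exact h.trans ((List.prefix_append x ('\n' :: y)).isInfix)
    · exact h.trans ((List.suffix_append_of_suffix (List.suffix_cons '\n' y)).isInfix)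

theorem pvIsIn_nil (kw : List Char) (hkw : kw ≠ []) : PySem.Chars.isIn kw [] = false := by
  rw [PySem.Chars.isIn_eq_false_iff]
  simpa using hkw


theorem pvJoin_no_kw (kw : List Char) (hkw : kw ≠ []) (hc : '\n' ∉ kw) :
    ∀ L : List (List Char), (∀ ln ∈ L, PySem.Chars.isIn kw ln = false) →
    PySem.Chars.isIn kw (pvJoinC '\n' L) = false := by
  intro L
  induction L with
  | nil => intro _; exact pvIsIn_nil kw hkw
  | cons a L ih =>
    intro h
    cases L with
    | nil => exact h a (by simp)
    | cons b T =>
      rw [show pvJoinC '\n' (a :: b :: T) = a ++ '\n' :: pvJoinC '\n' (b :: T) from rfl]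
      rw [PySem.Chars.isIn_eq_false_iff, pvInfixSplit kw _ _ hc]
      push_neg
      constructor
      · exact (PySem.Chars.isIn_eq_false_iff kw a).mp (h a (by simp))
      · exact (PySem.Chars.isIn_eq_false_iff kw _).mp (ih (fun ln hln => h ln (by simp [hln])))

def pvP (kw s ln : List Char) : Prop :=
  ∃ u v, s = u ++ ln ++ v ∧ (u = [] ∨ ∃ u', u = u' ++ ['\n']) ∧ (v = [] ∨ ∃ v', v = '\n' :: v') ∧
    '\n' ∉ ln ∧ PySem.Chars.isIn kw ln = true ∧ PySem.Chars.isIn kw u = false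

theorem pvFirst_P (kw : List Char) (hkw : kw ≠ []) (hc : '\n' ∉ kw) :
    ∀ L : List (List Char), (∀ l ∈ L, '\n' ∉ l) →
    ∀ ln, (L.filter (fun l => PySem.Chars.isIn kw l)).head? = some ln →
    pvP kw (pvJoinC '\n' L) ln := by
  intro L
  induction L with
  | nil => intro _ ln h; simp at h
  | cons a L ih =>
    intro hL ln h
    cases hfa : PySem.Chars.isIn kw a with
    | true =>
      rw [List.filter_cons_of_pos hfa] at h
      simp only [List.head?_cons, Option.some.injEq] at h
      subst h
      cases L with
      | nil => exact ⟨[], [], by simp [pvJoinC], Or.inl rfl, Or.inl rfl,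
          hL a (by simp), hfa, pvIsIn_nil kw hkw⟩
      | cons b T =>
        exact ⟨[], '\n' :: pvJoinC '\n' (b :: T), by simp [pvJoinC], Or.inl rfl,
          Or.inr ⟨_, rfl⟩, hL a (by simp), hfa, pvIsIn_nil kw hkw⟩
    | false =>
      rw [List.filter_cons_of_neg (by simp [hfa])] at h
      cases L with
      | nil => simp at h
      | cons b T =>
        obtain ⟨u, v, hs, hu, hv, hcln, hkwln, hkwu⟩ := ih (fun l hl => hL l (by simp [hl])) ln h
        refine ⟨a ++ '\n' :: u, v, ?_, ?_, hv, hcln, hkwln, ?_⟩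
        · rw [show pvJoinC '\n' (a :: b :: T) = a ++ '\n' :: pvJoinC '\n' (b :: T) from rfl, hs]
          simp
        · rcases hu with h1 | ⟨u', h1⟩
          · subst h1; exact Or.inr ⟨a, by simp⟩
          · subst h1; exact Or.inr ⟨a ++ '\n' :: u', by simp⟩
        · rw [PySem.Chars.isIn_eq_false_iff, pvInfixSplit kw _ _ hc]
          push_neg
          exact ⟨(PySem.Chars.isIn_eq_false_iff kw a).mp hfa,
            (PySem.Chars.isIn_eq_false_iff kw u).mp hkwu⟩

theorem pvLineEq (ln v ln' v' : List Char) (heq : ln ++ v = ln' ++ v')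
    (hcln' : '\n' ∉ ln') (hv : v = [] ∨ ∃ t, v = '\n' :: t)
    (hlen : ln.length ≤ ln'.length) : ln = ln' := by
  have hpre : ln = ln'.take ln.length := by
    have h1 := congrArg (List.take ln.length) heq
    rwa [List.take_append_of_le_length le_rfl, List.take_length,
      List.take_append_of_le_length hlen] at h1
  rcases Nat.lt_or_ge ln.length ln'.length with hlt | hge
  · exfalso
    have hvne : v ≠ [] := by
      intro hvn
      subst hvn
      have := congrArg List.length heq
      simp at this
      omega
    obtain ⟨t, hvt⟩ : ∃ t, v = '\n' :: t := by
      rcases hv with h | h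
      · exact absurd h hvne
      · exact h
    subst hvt
    have h1 : (ln ++ '\n' :: t)[ln.length]'(by simp) = '\n' := by
      rw [List.getElem_append_right (by omega)]
      simp
    have h2 : (ln' ++ v')[ln.length]'(by simp; omega) = ln'[ln.length]'hlt :=
      List.getElem_append_left hlt
    have h3 : (ln' ++ v')[ln.length]'(by simp; omega) = '\n' :=
      (List.getElem_of_eq heq (by simp)).symm.trans h1
    have h4 : ln'[ln.length]'hlt = '\n' := h2.symm.trans h3
    exact hcln' (h4 ▸ List.getElem_mem hlt)
  · rw [hpre, List.take_of_length_le (by omega)]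

theorem pvUniqLt (kw s ln v u ln' v' u' : List Char)
    (hs : s = u ++ ln ++ v) (hs' : s = u' ++ ln' ++ v')
    (hu' : u' = [] ∨ ∃ w, u' = w ++ ['\n'])
    (hcln : '\n' ∉ ln) (hkwln : PySem.Chars.isIn kw ln = true)
    (hkwu' : PySem.Chars.isIn kw u' = false) (hkwne : kw ≠ [])
    (hlt : u.length < u'.length) : False := by
  obtain ⟨w, hw⟩ : ∃ w, u' = w ++ ['\n'] := by
    rcases hu' with h | h
    · subst h; simp at hlt
    · exact h
  obtain ⟨j, hj⟩ := (pvIsIn_iff_exists kw ln).mp hkwln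
  have hkw1 : 1 ≤ kw.length := by
    cases kw with
    | nil => exact absurd rfl hkwne
    | cons _ _ => simp
  have hjlen : j + kw.length ≤ ln.length := by
    have h1 := hj.length_le
    simp only [List.length_drop] at h1
    omega
  have habs : kw <+: s.drop (u.length + j) := by
    rw [hs, List.append_assoc, List.drop_length_add_append,
      List.drop_append_of_le_length (by omega)]
    exact hj.trans (List.prefix_append _ _)
  by_cases hq : u'.length ≤ u.length + ln.length
  · -- the '\n' ending u' falls inside ln: contradiction with '\n' ∉ ln
    have hwlen : w.length + 1 = u'.length := by rw [hw]; simp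
    have hql : w.length < s.length := by
      rw [hs']
      simp only [List.length_append]
      omega
    have e1 : s = (w ++ ['\n']) ++ (ln' ++ v') := by rw [hs', hw, List.append_assoc]
    have h1 : s[w.length]'hql = '\n' := by
      rw [List.getElem_of_eq e1 hql, List.getElem_append_left (by simp),
        List.getElem_append_right (by omega)]
      simp
    have hb : w.length - u.length < ln.length := by omega
    have hb2 : u.length ≤ w.length := by omega
    have e2 : s = u ++ (ln ++ v) := by rw [hs, List.append_assoc]
    have h2 : s[w.length]'hql = ln[w.length - u.length]'hb := by
      rw [List.getElem_of_eq e2 hql, List.getElem_append_right hb2,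
        List.getElem_append_left hb]
    exact hcln ((h2.symm.trans h1) ▸ List.getElem_mem hb)
  · -- kw occurs wholly inside u': contradiction with isIn kw u' = false
    push_neg at hq
    have h3 : kw <+: (s.drop (u.length + j)).take (u'.length - (u.length + j)) :=
      List.prefix_take_iff.mpr ⟨habs, by omega⟩
    have h4 : (s.drop (u.length + j)).take (u'.length - (u.length + j)) = u'.drop (u.length + j) := by
      rw [hs', List.append_assoc, ← List.drop_take]
      rw [List.take_append_of_le_length le_rfl, List.take_length]
    rw [h4] at h3
    have h5 : PySem.Chars.isIn kw u' = true := (pvIsIn_iff_exists kw u').mpr ⟨_, h3⟩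
    rw [hkwu'] at h5
    cases h5

theorem pvUniq (kw s ln ln' : List Char) (h : pvP kw s ln) (h' : pvP kw s ln') : ln = ln' := by
  obtain ⟨u, v, hs, hu, hv, hcln, hkwln, hkwu⟩ := h
  obtain ⟨u', v', hs', hu', hv', hcln', hkwln', hkwu'⟩ := h'
  have hkwne : kw ≠ [] := by
    intro hk
    subst hk
    rw [PySem.Chars.isIn_nil] at hkwu
    cases hkwu
  rcases Nat.lt_trichotomy u.length u'.length with hlt | heq | hlt
  · exact absurd (pvUniqLt kw s ln v u ln' v' u' hs hs' hu' hcln hkwln hkwu' hkwne hlt) id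
  · have hueq : u = u' := by
      have h1 : u = s.take u.length := by
        rw [hs, List.append_assoc, List.take_append_of_le_length le_rfl, List.take_length]
      have h2 : u' = s.take u'.length := by
        rw [hs', List.append_assoc, List.take_append_of_le_length le_rfl, List.take_length]
      rw [h1, h2, heq]
    subst hueq
    have heq2 : ln ++ v = ln' ++ v' := by
      have := hs.symm.trans hs'
      simpa using this
    rcases le_total ln.length ln'.length with hle | hle
    · exact pvLineEq ln v ln' v' heq2 hcln' hv hle
    · exact (pvLineEq ln' v' ln v heq2.symm hcln hv' hle).symm
  · exact absurd (pvUniqLt kw s ln' v' u' ln v u hs' hs hu hcln' hkwln' hkwu hkwne hlt) id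

theorem pvSingletonPrefix (c : Char) (l : List Char) : [c] <+: l ↔ ∃ t, l = c :: t := by
  constructor
  · rintro ⟨r, hr⟩
    exact ⟨r, by simpa using hr.symm⟩
  · rintro ⟨t, ht⟩
    exact ⟨t, by simp [ht]⟩

theorem pvRfindGo (s sub : List Char) : ∀ k : Nat,
    (PySem.Chars.rfind.go s sub k = -1 ∧ ∀ j : Nat, j ≤ k → ¬ sub <+: s.drop j) ∨
    (∃ m : Nat, PySem.Chars.rfind.go s sub k = (m : Int) ∧ m ≤ k ∧ sub <+: s.drop m ∧
      ∀ j : Nat, m < j → j ≤ k → ¬ sub <+: s.drop j) := by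
  intro k
  induction k with
  | zero =>
    rw [PySem.Chars.rfind.go]
    by_cases h : sub.isPrefixOf s
    · right
      exact ⟨0, by simp [h], le_rfl, by simpa using List.isPrefixOf_iff_prefix.mp h,
        fun j h1 h2 => by omega⟩
    · left
      refine ⟨by simp [h], fun j hj => ?_⟩
      have hj0 : j = 0 := by omega
      subst hj0
      simpa [List.isPrefixOf_iff_prefix] using h
  | succ n ih =>
    rw [PySem.Chars.rfind.go]
    by_cases h : sub.isPrefixOf (s.drop (n + 1))
    · right
      exact ⟨n + 1, by simp [h], le_rfl, List.isPrefixOf_iff_prefix.mp h,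
        fun j h1 h2 => by omega⟩
    · simp only [h, Bool.false_eq_true, if_false]
      rcases ih with ⟨hval, hall⟩ | ⟨m, hval, hm, hpre, hall⟩
      · left
        refine ⟨hval, fun j hj => ?_⟩
        rcases Nat.lt_or_ge j (n + 1) with h1 | h1
        · exact hall j (by omega)
        · have : j = n + 1 := by omega
          subst this
          simpa [List.isPrefixOf_iff_prefix] using h
      · right
        refine ⟨m, hval, by omega, hpre, fun j h1 h2 => ?_⟩
        rcases Nat.lt_or_ge j (n + 1) with h3 | h3
        · exact hall j h1 (by omega)
        · have : j = n + 1 := by omega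
          subst this
          simpa [List.isPrefixOf_iff_prefix] using h

theorem pvRfindCases (t sub : List Char) :
    (PySem.Chars.rfind t sub = -1 ∧ ∀ j : Nat, j ≤ t.length → ¬ sub <+: t.drop j) ∨
    (∃ m : Nat, PySem.Chars.rfind t sub = (m : Int) ∧ m ≤ t.length ∧ sub <+: t.drop m ∧
      ∀ j : Nat, m < j → j ≤ t.length → ¬ sub <+: t.drop j) := by
  simpa [PySem.Chars.rfind] using pvRfindGo t sub t.length

theorem pvRfindFrom0 (s sub : List Char) (i : Int) (h0 : 0 ≤ i) (hn : i ≤ (s.length : Int)) :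
    PySem.Chars.rfindFrom s sub 0 (some i) = PySem.Chars.rfind (s.take i.toNat) sub := by
  simp only [PySem.Chars.rfindFrom]
  split_ifs with h1 h2 h3 h4 h5 h6 h7 <;> try omega
  all_goals simp_all

def pvExtract (s : List Char) (i : Int) : List Char :=
  let st := PySem.Chars.rfindFrom s ['\n'] 0 (some i) + 1
  let e := PySem.Chars.findFrom s ['\n'] i
  if e = -1 then PySem.Chars.slice s (some st) none else PySem.Chars.slice s (some st) (some e)

theorem pvB (kw s : List Char) (hc : '\n' ∉ kw) (hkw : kw ≠ []) (i : Int)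
    (hfind : PySem.Chars.find s kw = i) (hi : 0 ≤ i) :
    pvP kw s (pvExtract s i) := by
  have hkw1 : 1 ≤ kw.length := by
    cases kw with
    | nil => exact absurd rfl hkw
    | cons _ _ => simp
  have hfl := PySem.Chars.find_le_length s kw
  rw [hfind] at hfl
  obtain ⟨hocc, hmin⟩ := PySem.Chars.find_spec (s := s) (sub := kw) (by rw [hfind]; exact hi)
  rw [hfind] at hocc hmin
  set i₀ := i.toNat with hi₀def
  have hii : i = (i₀ : Int) := by omega
  have hi₀n : i₀ ≤ s.length := by omega
  have hlen0 : kw.length ≤ s.length - i₀ := by simpa [List.length_drop] using hocc.length_le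
  have hlen13 : i₀ + kw.length ≤ s.length := by omega
  -- ===== left boundary: rfind on s.take i₀ =====
  have hrff : PySem.Chars.rfindFrom s ['\n'] 0 (some i) = PySem.Chars.rfind (s.take i₀) ['\n'] := by
    rw [pvRfindFrom0 s ['\n'] i hi hfl]
  have htlen : (s.take i₀).length = i₀ := by simp [hi₀n]
  -- produce st₀ with its properties
  obtain ⟨st₀, hst_eq, hst_le, hgapL, huor⟩ :
      ∃ st₀ : Nat, PySem.Chars.rfindFrom s ['\n'] 0 (some i) + 1 = (st₀ : Int) ∧ st₀ ≤ i₀ ∧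
        (∀ j : Nat, (h : j < s.length) → st₀ ≤ j → j < i₀ → s[j]'h ≠ '\n') ∧
        (s.take st₀ = [] ∨ ∃ w, s.take st₀ = w ++ ['\n']) := by
    rcases pvRfindCases (s.take i₀) ['\n'] with ⟨hval, hall⟩ | ⟨m, hval, hm, hpre, hall⟩
    · refine ⟨0, by rw [hrff, hval]; norm_num, by omega, ?_, Or.inl (by simp)⟩
      intro j h _ hj hjc
      apply hall j (by omega)
      refine (pvSingletonPrefix '\n' _).mpr ⟨(s.take i₀).drop (j+1), ?_⟩
      rw [List.drop_eq_getElem_cons (show j < (s.take i₀).length by rw [htlen]; omega)]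
      simp [List.getElem_take, hjc]
    · rw [htlen] at hm hall
      have hmlt : m < i₀ := by
        rcases Nat.lt_or_ge m i₀ with h | h
        · exact h
        · exfalso
          have : (s.take i₀).drop m = [] := by
            apply List.drop_eq_nil_of_le
            omega
          rw [this] at hpre
          obtain ⟨t, ht⟩ := (pvSingletonPrefix '\n' _).mp hpre
          simp at ht
      have hsm : s[m]'(by omega) = '\n' := by
        obtain ⟨t, ht⟩ := (pvSingletonPrefix '\n' _).mp hpre
        have := List.drop_eq_getElem_cons (l := s.take i₀) (show m < (s.take i₀).length by rw [htlen]; omega)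
        rw [ht] at this
        have h2 : (s.take i₀)[m]'(by omega) = '\n' := by
          injection this.symm with h2 _
        rwa [List.getElem_take] at h2
      refine ⟨m + 1, by rw [hrff, hval]; norm_num, by omega, ?_, Or.inr ⟨s.take m, ?_⟩⟩
      · intro j h hj1 hj2 hjc
        apply hall j (by omega) (by omega)
        refine (pvSingletonPrefix '\n' _).mpr ⟨(s.take i₀).drop (j+1), ?_⟩
        rw [List.drop_eq_getElem_cons (show j < (s.take i₀).length by rw [htlen]; omega)]
        simp [List.getElem_take, hjc]
      · rw [List.take_succ_eq_append_getElem (by omega)]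
        rw [hsm]
  -- ===== right boundary: find on s.drop i₀ =====
  set f := PySem.Chars.find (s.drop i₀) ['\n'] with hfdef
  have hffrom : PySem.Chars.findFrom s ['\n'] i = if f = -1 then -1 else (i₀ : Int) + f := by
    rw [hii, PySem.Chars.findFrom_natCast s ['\n'] i₀ hi₀n, ← hfdef]
  obtain ⟨end₀, hend_eq, hend_le, hi₀end', hgapR, hvor⟩ :
      ∃ end₀ : Nat, (PySem.Chars.findFrom s ['\n'] i = -1 ∧ end₀ = s.length ∨
          PySem.Chars.findFrom s ['\n'] i = (end₀ : Int) ∧ PySem.Chars.findFrom s ['\n'] i ≠ -1) ∧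
        end₀ ≤ s.length ∧ i₀ ≤ end₀ ∧
        (∀ j : Nat, (h : j < s.length) → i₀ ≤ j → j < end₀ → s[j]'h ≠ '\n') ∧
        (s.drop end₀ = [] ∨ ∃ v', s.drop end₀ = '\n' :: v') := by
    by_cases hf : f = -1
    · refine ⟨s.length, Or.inl ⟨by rw [hffrom, if_pos hf], rfl⟩, le_rfl, by omega, ?_, Or.inl (by simp)⟩
      intro j h hj1 hj2 hjc
      have : ('\n' : Char) ∈ s.drop i₀ := by
        have h9 : (s.drop i₀)[j - i₀]'(by simp only [List.length_drop]; omega) = s[j]'h := by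
          rw [List.getElem_drop]
          congr 1
          omega
        have h10 : (s.drop i₀)[j - i₀]'(by simp only [List.length_drop]; omega) = '\n' := h9.trans hjc
        exact h10 ▸ List.getElem_mem _
      have h2 := (PySem.Chars.find_eq_neg_one_iff (s.drop i₀) ['\n']).mp hf
      exact h2 ((List.singleton_infix_iff '\n' _).mpr this)
    · have hf0 : 0 ≤ f := by
        have := PySem.Chars.neg_one_le_find (s.drop i₀) ['\n']
        rw [← hfdef] at this
        omega
      obtain ⟨hfocc, hfmin⟩ := PySem.Chars.find_spec (s := s.drop i₀) (sub := ['\n']) hf0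
      set f₀ := f.toNat with hf₀def
      have hfln := PySem.Chars.find_le_length (s.drop i₀) ['\n']
      rw [← hfdef] at hfln
      simp only [List.length_drop] at hfln
      rw [List.drop_drop] at hfocc
      obtain ⟨t, ht⟩ := (pvSingletonPrefix '\n' _).mp hfocc
      have hend_lt : i₀ + f₀ < s.length := by
        by_contra hcon
        rw [List.drop_eq_nil_of_le (by omega)] at ht
        simp at ht
      have hsend : s[i₀ + f₀]'hend_lt = '\n' := by
        have := List.drop_eq_getElem_cons (l := s) hend_lt
        rw [ht] at this
        injection this.symm with h2 _
      refine ⟨i₀ + f₀, Or.inr ⟨by rw [hffrom, if_neg hf]; omega, by rw [hffrom, if_neg hf]; omega⟩,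
        by omega, by omega, ?_, Or.inr ⟨s.drop (i₀ + f₀ + 1), by
          rw [List.drop_eq_getElem_cons hend_lt, hsend]⟩⟩
      intro j h hj1 hj2 hjc
      apply hfmin (j - i₀) (by omega)
      rw [List.drop_drop]
      have hjj : i₀ + (j - i₀) = j := by omega
      rw [hjj]
      refine (pvSingletonPrefix '\n' _).mpr ⟨s.drop (j+1), ?_⟩
      rw [List.drop_eq_getElem_cons (show j < s.length from h)]
      simp [hjc]
  -- the right end lies beyond the keyword occurrence
  have hi₀end : i₀ + kw.length ≤ end₀ := by
    rcases hvor with hvnil | ⟨v', hv'⟩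
    · have : s.length ≤ end₀ := List.drop_eq_nil_iff.mp hvnil
      omega
    · have hlt : end₀ < s.length := by
        by_contra hcon
        push_neg at hcon
        rw [List.drop_eq_nil_of_le hcon] at hv'
        simp at hv'
      have hse : s[end₀]'hlt = '\n' := by
        have := List.drop_eq_getElem_cons (l := s) hlt
        rw [hv'] at this
        injection this.symm with h2 _
      by_contra hcon
      push_neg at hcon
      have hblt : end₀ - i₀ < kw.length := by omega
      have h1 := List.IsPrefix.getElem hocc hblt
      have h2 : (s.drop i₀)[end₀ - i₀]'(by simp only [List.length_drop]; omega) = s[end₀]'hlt := by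
        rw [List.getElem_drop]
        congr 1
        omega
      have h3 : kw[end₀ - i₀]'hblt = '\n' := by
        rw [h1]
        exact h2.trans hse
      exact hc (h3 ▸ List.getElem_mem hblt)
  -- the three pieces
  set u := s.take st₀ with hudef
  set ln := (s.drop st₀).take (end₀ - st₀) with hlndef
  set v := s.drop end₀ with hvdef
  have hext : pvExtract s i = ln := by
    simp only [pvExtract]
    rw [hst_eq]
    rcases hend_eq with ⟨hfneg, hlen_eq⟩ | ⟨heq', hne⟩
    · rw [if_pos hfneg]
      rw [PySem.Chars.slice_eq_listSlice, PySem.List.slice_from s (by positivity)]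
      rw [hlndef, hlen_eq]
      rw [List.take_of_length_le (by simp)]
      simp
    · rw [if_neg hne, heq']
      rw [PySem.Chars.slice_eq_listSlice, PySem.List.slice_toNat s (by positivity) (by positivity)]
      simp [hlndef]
  rw [hext]
  refine ⟨u, v, ?_, huor, hvor, ?_, ?_, ?_⟩
  · -- s = u ++ ln ++ v
    have h1 : s.take end₀ = u ++ ln := by
      conv_lhs => rw [show end₀ = st₀ + (end₀ - st₀) by omega]
      rw [List.take_add]
    conv_lhs => rw [← List.take_append_drop end₀ s]
    rw [h1]
  · -- '\n' ∉ ln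
    intro hmem
    obtain ⟨r, hr, hrv⟩ := List.mem_iff_getElem.mp hmem
    have hrlen : r < end₀ - st₀ := by
      have := hr
      simp only [hlndef, List.length_take, List.length_drop] at this
      omega
    have hrs : st₀ + r < s.length := by
      have := hr
      simp only [hlndef, List.length_take, List.length_drop] at this
      omega
    have hval : ln[r]'hr = s[st₀ + r]'hrs := by
      simp only [hlndef, List.getElem_take, List.getElem_drop]
    rcases Nat.lt_or_ge (st₀ + r) i₀ with hcase | hcase
    · exact hgapL (st₀ + r) hrs (by omega) hcase (hval ▸ hrv)
    · exact hgapR (st₀ + r) hrs (by omega) (by omega) (hval ▸ hrv)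
  · -- kw occurs in ln
    rw [pvIsIn_iff_exists]
    refine ⟨i₀ - st₀, ?_⟩
    rw [hlndef, List.drop_take, List.drop_drop]
    rw [show st₀ + (i₀ - st₀) = i₀ by omega, show end₀ - st₀ - (i₀ - st₀) = end₀ - i₀ by omega]
    exact List.prefix_take_iff.mpr ⟨hocc, by omega⟩
  · -- kw does not occur in u
    rw [PySem.Chars.isIn_eq_false_iff]
    intro hinf
    obtain ⟨j, hj⟩ := (pvIsIn_iff_exists kw u).mp ((PySem.Chars.isIn_iff_infix kw u).mpr hinf)
    rw [hudef, List.drop_take] at hj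
    obtain ⟨hj1, hj2⟩ := List.prefix_take_iff.mp hj
    exact hmin j (by omega) hj1

theorem pvFinal (text : String) : getScancloud text = getScancloud_alt text := by
  unfold getScancloud getScancloud_alt
  have hkw : ("Seller party:".toList : List Char) ≠ [] := by decide
  have hc : '\n' ∉ "Seller party:".toList := by decide
  have htab : PySem.Str.split? text "\n" = some ((pvSplitC '\n' text.toList).map String.ofList) := by
    simp [PySem.Str.split?, PySem.Chars.split?, pvSplitOn_eq]
  rw [htab]
  simp only [Option.getD_some]
  rw [PySem.List.foldl_append_if_eq_filter]
  rw [List.nil_append]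
  have hfm : (List.filter (fun e => PySem.Str.isIn "Seller party:" e) ((pvSplitC '\n' text.toList).map String.ofList))
      = ((pvSplitC '\n' text.toList).filter (fun l => PySem.Chars.isIn "Seller party:".toList l)).map String.ofList := by
    rw [List.filter_map]
    congr 1
    apply List.filter_congr
    intro x _
    simp
  rw [hfm]
  cases hF : (pvSplitC '\n' text.toList).filter (fun l => PySem.Chars.isIn "Seller party:".toList l) with
  | nil =>
    have hnin : PySem.Chars.isIn "Seller party:".toList text.toList = false := by
      have hall : ∀ l ∈ pvSplitC '\n' text.toList, PySem.Chars.isIn "Seller party:".toList l = false := by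
        intro l hl
        have := List.filter_eq_nil_iff.mp hF l hl
        simpa using this
      have := pvJoin_no_kw "Seller party:".toList hkw hc (pvSplitC '\n' text.toList) hall
      rwa [pvJoin_split] at this
    clear hF
    have hfneg : PySem.Str.find text "Seller party:" = -1 := by
      rw [PySem.Str.find_eq, PySem.Chars.find_eq_neg_one_iff]
      exact (PySem.Chars.isIn_eq_false_iff _ _).mp hnin
    simp only [List.map_nil]
    rw [if_pos hfneg, if_neg (by simp)]
  | cons ln T =>
    have hP_A : pvP "Seller party:".toList text.toList ln := by
      have h1 := pvFirst_P "Seller party:".toList hkw hc (pvSplitC '\n' text.toList)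
        (pvSplitC_no_sep '\n' text.toList) ln (by rw [hF]; rfl)
      rwa [pvJoin_split] at h1
    have hinf : "Seller party:".toList <:+: text.toList := by
      obtain ⟨u, v, hs, _, _, _, hkwln, _⟩ := hP_A
      have h2 := (PySem.Chars.isIn_iff_infix _ _).mp hkwln
      exact h2.trans ⟨u, v, by rw [hs]⟩
    have hi : 0 ≤ PySem.Str.find text "Seller party:" := by
      rw [PySem.Str.find_eq]
      exact (PySem.Chars.find_nonneg_iff _ _).mpr hinf
    have hine : ¬ (PySem.Str.find text "Seller party:" = -1) := by omega
    have hP_B : pvP "Seller party:".toList text.toList (pvExtract text.toList (PySem.Str.find text "Seller party:")) :=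
      pvB "Seller party:".toList text.toList hc hkw _ (by rw [PySem.Str.find_eq]) hi
    have hlneq : ln = pvExtract text.toList (PySem.Str.find text "Seller party:") :=
      pvUniq _ _ _ _ hP_A hP_B
    have hline : (if PySem.Str.findFrom text "\n" (PySem.Str.find text "Seller party:") none = -1 then
          PySem.Str.slice text (some (PySem.Str.rfindFrom text "\n" 0 (some (PySem.Str.find text "Seller party:")) + 1)) none
        else PySem.Str.slice text (some (PySem.Str.rfindFrom text "\n" 0 (some (PySem.Str.find text "Seller party:")) + 1))
          (some (PySem.Str.findFrom text "\n" (PySem.Str.find text "Seller party:") none)))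
        = String.ofList ln := by
      apply String.toList_inj.mp
      rw [String.toList_ofList, hlneq]
      simp only [pvExtract, PySem.Str.findFrom_eq, PySem.Str.rfindFrom_eq, PySem.Str.find_eq,
        show ("\n".toList : List Char) = ['\n'] from rfl]
      split_ifs with h
      · simp [PySem.Str.toList_slice]
      · simp [PySem.Str.toList_slice]
    simp only [List.map_cons]
    rw [hline, if_neg hine]

-- ===== VERDICT (by name: the statement is the Claim_ definition above) =====
theorem getScancloud_spec : Claim_equal_getScancloud := by
  intro text _
  unfold Spec_getScancloud
  exact pvFinal text
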